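-- pv_equiv track=rewrite | github.com/lukestead919/AdventOfCode | src/aoc/aoc2021/12.py | valid_path_b
-- ===== SOURCE A (Python) =====
-- from collections import Counter
--
-- def valid_path_b(path: list[str]):
--     counter = Counter(path)
--     small_caves_visited = [v for k, v in counter.items() if k.islower() and v > 1]
--
--     if len(small_caves_visited) == 0:
--         return True
--     elif len(small_caves_visited) == 1 and small_caves_visited[0] == 2 and counter['start'] == 1:
--         return True
--     else:
--         return False
-- ===== SOURCE B (Python) =====
-- def valid_path_b(path: list[str]):
--     # One pass, no frequency table: track seen small caves, the first small cave
--     # revisited ('twice'), an invalidation flag, and how often 'start' occurs.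
--     seen = set()
--     twice = None
--     over = False
--     start = 0
--     for cave in path:
--         if cave == 'start':
--             start += 1
--         if cave.islower():
--             if cave not in seen:
--                 seen.add(cave)
--             elif twice is None:
--                 twice = cave
--             else:
--                 over = True
--     if over:
--         return False
--     if twice is None:
--         return True
--     return start == 1
-- ===== Notes on version B (the rewrite author's own statement) =====
-- stated objective: alternative
-- what changed: Replaces building a full Counter and filtering its items with a single left-to-right scan that maintains a seen-set of small caves, the first revisited small cave, an invalidation flag and a 'start' counter.
import Mathlib
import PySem

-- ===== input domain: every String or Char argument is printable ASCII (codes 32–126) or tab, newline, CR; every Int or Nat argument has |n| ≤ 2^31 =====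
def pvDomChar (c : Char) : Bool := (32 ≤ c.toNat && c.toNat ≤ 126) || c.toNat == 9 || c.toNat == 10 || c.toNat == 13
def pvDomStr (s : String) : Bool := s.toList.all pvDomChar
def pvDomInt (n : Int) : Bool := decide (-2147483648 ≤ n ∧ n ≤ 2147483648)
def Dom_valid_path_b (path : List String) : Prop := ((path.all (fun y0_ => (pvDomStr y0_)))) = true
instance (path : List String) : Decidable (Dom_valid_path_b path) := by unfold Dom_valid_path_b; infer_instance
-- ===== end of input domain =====

-- B replaces A's build-a-Counter-then-filter pass by a single scan with running state (seen set, first revisited small cave, invalidation flag, start counter); alternative decomposition, same cost.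

-- shared primitive: Python str.islower() — exact on ASCII, where the cased
-- characters are exactly the letters: true iff some lowercase letter occurs and
-- no uppercase letter occurs.
def pyIslower (s : String) : Bool :=
  s.toList.any PySem.Chars.islower && s.toList.all (fun c => !PySem.Chars.isupper c)

-- ===== PORT A =====
def valid_path_b (path : List String) : Bool :=
  let counter := PySem.Dict.counter path
  let small_caves_visited :=
    (counter.items.filter (fun kv => pyIslower kv.1 && decide ((1 : Int) < kv.2))).map Prod.snd
  if small_caves_visited.length = 0 then true
  else if small_caves_visited.length = 1
        ∧ PySem.List.pyGet? small_caves_visited 0 = some (2 : Int)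
        ∧ counter.getD "start" 0 = (1 : Int) then true
  else false

-- ===== PORT B =====
-- state: (seen small caves, first revisited small cave, invalidated, count of "start")
def vpbStep (st : PySem.Set String × Option String × Bool × Int) (cave : String) :
    PySem.Set String × Option String × Bool × Int :=
  let seen := st.1
  let twice := st.2.1
  let ovr := st.2.2.1
  let start := st.2.2.2
  let start := if cave == "start" then start + 1 else start
  if pyIslower cave then
    if !(PySem.Set.contains seen cave) then (PySem.Set.add seen cave, twice, ovr, start)
    else match twice with
      | none => (seen, some cave, ovr, start)
      | some _ => (seen, twice, true, start)
  else (seen, twice, ovr, start)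

def valid_path_b_alt (path : List String) : Bool :=
  let st := path.foldl vpbStep (PySem.Set.empty, none, false, (0 : Int))
  if st.2.2.1 then false
  else match st.2.1 with
    | none => true
    | some _ => decide (st.2.2.2 = 1)

-- ===== PRECONDITION & SPEC =====
def Spec_valid_path_b (path : List String) (out : Bool) : Prop := out = valid_path_b_alt path
instance (path : List String) (out : Bool) : Decidable (Spec_valid_path_b path out) := by unfold Spec_valid_path_b; infer_instance

-- ===== CLAIM (what is proved, stated in full; the proofs are below) =====
def Claim_equal_valid_path_b : Prop := ∀ (path : List String), Dom_valid_path_b path → Spec_valid_path_b path (valid_path_b path)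

-- ===== LEMMAS AND PROOFS =====

theorem vpb_count_snoc (l : List String) (c x : String) :
    (l ++ [c]).count x = l.count x + (if x = c then 1 else 0) := by
  rw [List.count_append]
  rcases eq_or_ne x c with h | h
  · subst h; simp
  · simp [h, Ne.symm h]

theorem vpb_count_snoc_le (l : List String) (c x : String) :
    l.count x ≤ (l ++ [c]).count x := by
  rw [vpb_count_snoc]; split_ifs <;> omega

-- the invalidating situations: some small cave thrice, or two distinct doubled small caves
def vpbBad (l : List String) : Prop :=
  (∃ x ∈ l, pyIslower x = true ∧ 3 ≤ l.count x) ∨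
  (∃ x ∈ l, ∃ y ∈ l, x ≠ y ∧ pyIslower x = true ∧ pyIslower y = true ∧
      2 ≤ l.count x ∧ 2 ≤ l.count y)

theorem vpbBad_snoc (l : List String) (c : String) (h : vpbBad l) : vpbBad (l ++ [c]) := by
  rcases h with ⟨x, hx, hs, h3⟩ | ⟨x, hx, y, hy, hxy, hsx, hsy, h2x, h2y⟩
  · exact Or.inl ⟨x, by simp [hx], hs, le_trans h3 (vpb_count_snoc_le l c x)⟩
  · exact Or.inr ⟨x, by simp [hx], y, by simp [hy], hxy, hsx, hsy,
      le_trans h2x (vpb_count_snoc_le l c x), le_trans h2y (vpb_count_snoc_le l c y)⟩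

-- loop invariant for B's fold over the processed prefix l
def vpbInv (l : List String) (st : PySem.Set String × Option String × Bool × Int) : Prop :=
  (∀ x : String, x ∈ st.1 ↔ (pyIslower x = true ∧ x ∈ l)) ∧
  st.2.2.2 = (l.count "start" : Int) ∧
  (match st.2.1, st.2.2.1 with
   | none, false => ∀ x ∈ l, pyIslower x = true → l.count x ≤ 1
   | some t, false => pyIslower t = true ∧ t ∈ l ∧ l.count t = 2 ∧
       ∀ x ∈ l, pyIslower x = true → x ≠ t → l.count x ≤ 1
   | some _, true => vpbBad l
   | none, true => False)

theorem vpbInv_nil : vpbInv [] (PySem.Set.empty, none, false, (0 : Int)) := by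
  refine ⟨?_, by simp, ?_⟩
  · intro x; simp [PySem.Set.empty]
  · intro x hx; simp at hx

theorem vpbInv_step (l : List String) (st : PySem.Set String × Option String × Bool × Int)
    (c : String) (h : vpbInv l st) : vpbInv (l ++ [c]) (vpbStep st c) := by
  obtain ⟨seen, twice, ovr, start⟩ := st
  obtain ⟨hseen, hstart, hm⟩ := h
  simp only at hseen hstart hm
  have hstart' : (if c == "start" then start + 1 else start) = ((l ++ [c]).count "start" : Int) := by
    rw [vpb_count_snoc]
    rcases eq_or_ne c "start" with hcs | hcs
    · simp [hcs, hstart]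
    · simp [hcs, Ne.symm hcs, hstart]
  simp only [vpbStep]
  by_cases hc : pyIslower c = true
  · rw [if_pos hc]
    by_cases hmem : c ∈ seen
    · -- cave already seen: c is small and c ∈ l
      have hcl : c ∈ l := ((hseen c).mp hmem).2
      have hmemEq : ∀ x : String, (x ∈ l ++ [c]) ↔ x ∈ l := by
        intro x
        rw [List.mem_append]
        constructor
        · rintro (h' | h')
          · exact h'
          · simp at h'; exact h' ▸ hcl
        · exact Or.inl
      have hseen' : ∀ x : String, x ∈ seen ↔ (pyIslower x = true ∧ x ∈ l ++ [c]) := by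
        intro x; rw [hseen x, hmemEq x]
      rw [if_neg (by simp [hmem])]
      match twice, ovr, hm with
      | none, false, hm =>
          -- first revisit: new twice = some c, count c becomes 2
          refine ⟨hseen', hstart', hc, (hmemEq c).mpr hcl, ?_, ?_⟩
          · have h1 : l.count c ≤ 1 := hm c hcl hc
            have h2 : 1 ≤ l.count c := List.count_pos_iff.mpr hcl
            rw [vpb_count_snoc, if_pos rfl]
            omega
          · intro x hx hxs hxc
            rw [vpb_count_snoc, if_neg hxc]
            have := hm x ((hmemEq x).mp hx) hxs
            omega
      | some t, false, hm =>
          -- second revisit: invalidated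
          obtain ⟨hts, htl, htc, hother⟩ := hm
          refine ⟨hseen', hstart', ?_⟩
          by_cases hct : c = t
          · refine Or.inl ⟨t, (hmemEq t).mpr htl, hts, ?_⟩
            subst hct
            rw [vpb_count_snoc, if_pos rfl]
            omega
          · refine Or.inr ⟨c, (hmemEq c).mpr hcl, t, (hmemEq t).mpr htl, hct, hc, hts, ?_, ?_⟩
            · have h2 : 1 ≤ l.count c := List.count_pos_iff.mpr hcl
              rw [vpb_count_snoc, if_pos rfl]
              omega
            · rw [vpb_count_snoc, if_neg (Ne.symm hct)]
              omega
      | some t, true, hm =>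
          exact ⟨hseen', hstart', vpbBad_snoc l c hm⟩
    · -- new small cave: count c in l is 0
      have hcl : c ∉ l := fun hcl => hmem ((hseen c).mpr ⟨hc, hcl⟩)
      have hc0 : l.count c = 0 := List.count_eq_zero.mpr hcl
      rw [if_pos (by simp [hmem])]
      have hseen' : ∀ x : String, x ∈ PySem.Set.add seen c ↔ (pyIslower x = true ∧ x ∈ l ++ [c]) := by
        intro x
        rw [PySem.Set.mem_add, hseen x, List.mem_append]
        constructor
        · rintro (⟨hx1, hx2⟩ | rfl)
          · exact ⟨hx1, Or.inl hx2⟩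
          · exact ⟨hc, Or.inr (by simp)⟩
        · rintro ⟨hx1, hx2 | hx2⟩
          · exact Or.inl ⟨hx1, hx2⟩
          · simp at hx2; exact Or.inr hx2
      have hcount' : ∀ x : String, x ∈ l → (l ++ [c]).count x = l.count x := by
        intro x hx
        have hxc : x ≠ c := fun h' => hcl (h' ▸ hx)
        rw [vpb_count_snoc, if_neg hxc]
        omega
      match twice, ovr, hm with
      | none, false, hm =>
          refine ⟨hseen', hstart', ?_⟩
          intro x hx hxs
          rcases List.mem_append.mp hx with hx' | hx'
          · rw [hcount' x hx']; exact hm x hx' hxs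
          · simp at hx'; subst hx'
            rw [vpb_count_snoc, if_pos rfl]
            omega
      | some t, false, hm =>
          obtain ⟨hts, htl, htc, hother⟩ := hm
          refine ⟨hseen', hstart', hts, by simp [htl], by rw [hcount' t htl]; exact htc, ?_⟩
          intro x hx hxs hxt
          rcases List.mem_append.mp hx with hx' | hx'
          · rw [hcount' x hx']; exact hother x hx' hxs hxt
          · simp at hx'; subst hx'
            rw [vpb_count_snoc, if_pos rfl]
            omega
      | some t, true, hm =>
          exact ⟨hseen', hstart', vpbBad_snoc l c hm⟩
  · -- not a small cave: state unchanged except start counter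
    rw [if_neg hc]
    have hcount' : ∀ x : String, pyIslower x = true → (l ++ [c]).count x = l.count x := by
      intro x hx
      have hxc : x ≠ c := fun h' => hc (h' ▸ hx)
      rw [vpb_count_snoc, if_neg hxc]
      omega
    have hmem' : ∀ x : String, pyIslower x = true → (x ∈ l ++ [c] ↔ x ∈ l) := by
      intro x hx
      rw [List.mem_append]
      constructor
      · rintro (h' | h')
        · exact h'
        · simp at h'; exact absurd (h' ▸ hx) hc
      · exact Or.inl
    have hseen' : ∀ x : String, x ∈ seen ↔ (pyIslower x = true ∧ x ∈ l ++ [c]) := by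
      intro x
      rw [hseen x]
      constructor
      · rintro ⟨h1, h2⟩; exact ⟨h1, List.mem_append.mpr (Or.inl h2)⟩
      · rintro ⟨h1, h2⟩; exact ⟨h1, (hmem' x h1).mp h2⟩
    match twice, ovr, hm with
    | none, false, hm =>
        refine ⟨hseen', hstart', ?_⟩
        intro x hx hxs
        rw [hcount' x hxs]
        exact hm x ((hmem' x hxs).mp hx) hxs
    | some t, false, hm =>
        obtain ⟨hts, htl, htc, hother⟩ := hm
        refine ⟨hseen', hstart', hts, (hmem' t hts).mpr htl, by rw [hcount' t hts]; exact htc, ?_⟩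
        intro x hx hxs hxt
        rw [hcount' x hxs]
        exact hother x ((hmem' x hxs).mp hx) hxs hxt
    | some t, true, hm =>
        exact ⟨hseen', hstart', vpbBad_snoc l c hm⟩

theorem vpbInv_foldl (l : List String) :
    vpbInv l (l.foldl vpbStep (PySem.Set.empty, none, false, (0 : Int))) := by
  induction l using List.reverseRecOn with
  | nil => exact vpbInv_nil
  | append_singleton l c ih =>
      rw [List.foldl_append]
      exact vpbInv_step l _ c ih

theorem vpb_final (path : List String)
    (h : vpbInv path (path.foldl vpbStep (PySem.Set.empty, none, false, (0 : Int)))) :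
    valid_path_b path = valid_path_b_alt path := by
  rcases hF : (path.foldl vpbStep (PySem.Set.empty, none, false, (0 : Int))) with ⟨seen, twice, ovr, start⟩
  rw [hF] at h
  obtain ⟨hseen, hstart, hm⟩ := h
  simp only at hseen hstart hm
  -- reshape A's intermediate list
  have hsmall :
      ((PySem.Dict.counter path).items.filter
          (fun kv => pyIslower kv.1 && decide ((1 : Int) < kv.2))).map Prod.snd
        = ((PySem.Set.ofList path).filter
            (fun k => pyIslower k && decide ((1 : Int) < (path.count k : Int)))).map
            (fun k => (path.count k : Int)) := by
    rw [PySem.Dict.items_counter, List.filter_map, List.map_map]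
    rfl
  have hq : ∀ k : String, (pyIslower k && decide ((1 : Int) < (path.count k : Int))) = true ↔
      (pyIslower k = true ∧ 2 ≤ path.count k) := by
    intro k
    simp only [Bool.and_eq_true, decide_eq_true_eq]
    constructor
    · rintro ⟨h1, h2⟩; exact ⟨h1, by exact_mod_cast h2⟩
    · rintro ⟨h1, h2⟩; exact ⟨h1, by exact_mod_cast h2⟩
  have hgetD : (PySem.Dict.counter path).getD "start" 0 = (path.count "start" : Int) := by
    exact PySem.Dict.getD_counter path "start"
  have hmemS : ∀ k : String, k ∈ PySem.Set.ofList path ↔ k ∈ path := by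
    intro k; exact PySem.Set.mem_ofList path k
  have hndS : (PySem.Set.ofList path).Nodup := PySem.Set.nodup_ofList path
  simp only [valid_path_b, valid_path_b_alt, hF, hsmall, hgetD]
  set T := (PySem.Set.ofList path).filter
      (fun k => pyIslower k && decide ((1 : Int) < (path.count k : Int))) with hT
  match twice, ovr, hm with
  | none, false, hm =>
      -- no doubled small cave: T = []
      have hTnil : T = [] := by
        rw [hT, List.filter_eq_nil_iff]
        intro a ha hqa
        obtain ⟨h1, h2⟩ := (hq a).mp hqa
        have := hm a ((hmemS a).mp ha) h1
        omega
      simp [hTnil]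
  | some t, false, hm =>
      obtain ⟨hts, htl, htc, hother⟩ := hm
      have htT : t ∈ T := by
        rw [hT, List.mem_filter]
        exact ⟨(hmemS t).mpr htl, (hq t).mpr ⟨hts, by omega⟩⟩
      have hall : ∀ a ∈ T, a = t := by
        intro a ha
        rw [hT, List.mem_filter] at ha
        obtain ⟨haS, hqa⟩ := ha
        obtain ⟨h1, h2⟩ := (hq a).mp hqa
        by_contra hat
        have := hother a ((hmemS a).mp haS) h1 hat
        omega
      have hTnd : T.Nodup := hndS.filter _
      have hTeq : T = [t] := by
        match hT' : T with
        | [] => simp at htT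
        | [a] =>
            have := hall a (by simp)
            simp [this]
        | a :: b :: rest =>
            have ha := hall a (by simp)
            have hb := hall b (by simp)
            rw [ha, hb] at hTnd
            simp at hTnd
      rw [hTeq]
      by_cases hs1 : (path.count "start" : Int) = 1
      · simp [htc, hs1, hstart, PySem.List.pyGet?, PySem.List.pyIdx?]
      · simp [htc, hs1, hstart, PySem.List.pyGet?, PySem.List.pyIdx?]
  | some t, true, hm =>
      -- invalidated: A must also return false
      rw [if_pos rfl]
      rcases hm with ⟨x, hxmem, hxs, hx3⟩ | ⟨x, hxmem, y, hymem, hxy, hxs, hys, h2x, h2y⟩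
      · have hxT : x ∈ T := by
          rw [hT, List.mem_filter]
          exact ⟨(hmemS x).mpr hxmem, (hq x).mpr ⟨hxs, by omega⟩⟩
        match hT' : T with
        | [] => simp at hxT
        | [a] =>
            simp at hxT
            subst hxT
            have hne : ((path.count x : Nat) : Int) ≠ (2 : Int) := by
              have h3 : (3 : Int) ≤ ((path.count x : Nat) : Int) := by exact_mod_cast hx3
              omega
            simp [hne, PySem.List.pyGet?, PySem.List.pyIdx?]
        | a :: b :: rest => simp
      · have hxT : x ∈ T := by
          rw [hT, List.mem_filter]
          exact ⟨(hmemS x).mpr hxmem, (hq x).mpr ⟨hxs, h2x⟩⟩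
        have hyT : y ∈ T := by
          rw [hT, List.mem_filter]
          exact ⟨(hmemS y).mpr hymem, (hq y).mpr ⟨hys, h2y⟩⟩
        match hT' : T with
        | [] => simp at hxT
        | [a] =>
            simp at hxT hyT
            exact absurd (hxT.trans hyT.symm) hxy
        | a :: b :: rest => simp

-- ===== VERDICT (by name: the statement is the Claim_ definition above) =====
theorem valid_path_b_spec : Claim_equal_valid_path_b := by
  intro path _
  unfold Spec_valid_path_b
  exact vpb_final path (vpbInv_foldl path)
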